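-- pv_equiv track=rewrite | github.com/gigo-gigo/atcoder | abc/abc446/c.py | solve
-- ===== SOURCE A (Python) =====
-- from collections import deque
--
-- def solve(N, D, A, B):
--     fifo = deque()
--     for i, (a, b) in enumerate(zip(A, B), 1):
--         for _ in range(a):
--             fifo.append(i + D)
--         while fifo and b > 0:
--             if fifo[0] >= i:
--                 b -= 1
--             fifo.popleft()
--         while fifo and fifo[0] <= i:
--             fifo.popleft()
--
--     ans = len(fifo)
--
--     return ans
-- ===== SOURCE B (Python) =====
-- def solve(N, D, A, B):
--     # run-length deque: blocks (expiry, count) with count > 0, expiries increasing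
--     q = []  # used as a deque via head index
--     head = 0
--     for i, (a, b) in enumerate(zip(A, B), 1):
--         if a > 0:
--             q.append((i + D, a))
--         while head < len(q) and b > 0:
--             e, c = q[head]
--             if e < i:
--                 head += 1  # expired block removed without consuming b
--             else:
--                 take = b if b < c else c
--                 b -= take
--                 if take == c:
--                     head += 1
--                 else:
--                     q[head] = (e, c - take)
--         while head < len(q) and q[head][0] <= i:
--             head += 1
--     return sum(c for _, c in q[head:])
-- ===== Notes on version B (the rewrite author's own statement) =====
-- stated objective: faster
-- what changed: Replaces the element-by-element FIFO of individual expiry timestamps with a run-length deque of (expiry,count) blocks processed by bulk arithmetic, so each day touches O(1) amortised blocks instead of O(a+b) items.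
import Mathlib
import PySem

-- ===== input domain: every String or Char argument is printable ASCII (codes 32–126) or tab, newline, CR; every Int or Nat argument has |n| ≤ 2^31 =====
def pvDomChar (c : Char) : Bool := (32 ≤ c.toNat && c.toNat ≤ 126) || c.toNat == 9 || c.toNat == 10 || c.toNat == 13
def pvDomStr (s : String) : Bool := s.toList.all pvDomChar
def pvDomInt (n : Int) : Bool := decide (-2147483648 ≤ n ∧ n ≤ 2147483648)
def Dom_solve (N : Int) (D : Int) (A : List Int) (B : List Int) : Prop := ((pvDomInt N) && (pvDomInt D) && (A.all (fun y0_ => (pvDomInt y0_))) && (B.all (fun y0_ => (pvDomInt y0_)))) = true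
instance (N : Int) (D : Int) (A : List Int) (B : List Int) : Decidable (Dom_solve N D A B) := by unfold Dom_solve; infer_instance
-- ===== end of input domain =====

-- B replaces A's item-by-item FIFO of expiry timestamps by a run-length deque of
-- (expiry,count) blocks handled with bulk arithmetic (objective: faster, asymptotic).

-- ===== PORT A =====
-- while fifo and b > 0: if fifo[0] >= i: b -= 1; fifo.popleft()
def solveDropB (b i : Int) : List Int → List Int
  | [] => []
  | x :: rest => if b > 0 then solveDropB (if x ≥ i then b - 1 else b) i rest else x :: rest

-- while fifo and fifo[0] <= i: fifo.popleft()
def solveDropExp (i : Int) : List Int → List Int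
  | [] => []
  | x :: rest => if x ≤ i then solveDropExp i rest else x :: rest

def solve (N : Int) (D : Int) (A : List Int) (B : List Int) : Int :=
  let fifo := (PySem.List.enumerate (A.zip B) 1).foldl
    (fun fifo p =>
      let i := p.1; let a := p.2.1; let b := p.2.2
      let f1 := (PySem.List.pyRange 0 a 1).foldl (fun f _ => f ++ [i + D]) fifo
      solveDropExp i (solveDropB b i f1))
    []
  (fifo.length : Int)

-- ===== PORT B =====
-- the bulk b-consuming while loop over (expiry,count) blocks; when 0 < take < c the
-- block is shrunk in place and b becomes 0, so the Python loop exits: we return directly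
def altDropB (b i : Int) : List (Int × Int) → List (Int × Int)
  | [] => []
  | (e, c) :: rest =>
    if b > 0 then
      if e < i then altDropB b i rest
      else
        let take := if b < c then b else c
        if take = c then altDropB (b - take) i rest
        else (e, c - take) :: rest
    else (e, c) :: rest

-- while q[head] expired: head += 1
def altDropExp (i : Int) : List (Int × Int) → List (Int × Int)
  | [] => []
  | (e, c) :: rest => if e ≤ i then altDropExp i rest else (e, c) :: rest

def solve_alt (N : Int) (D : Int) (A : List Int) (B : List Int) : Int :=
  let q := (PySem.List.enumerate (A.zip B) 1).foldl
    (fun q p =>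
      let i := p.1; let a := p.2.1; let b := p.2.2
      let q1 := if a > 0 then q ++ [(i + D, a)] else q
      altDropExp i (altDropB b i q1))
    []
  (q.map Prod.snd).sum

-- ===== PRECONDITION & SPEC =====
def Spec_solve (N : Int) (D : Int) (A : List Int) (B : List Int) (out : Int) : Prop := out = solve_alt N D A B
instance (N : Int) (D : Int) (A : List Int) (B : List Int) (out : Int) : Decidable (Spec_solve N D A B out) := by unfold Spec_solve; infer_instance

-- ===== CLAIM (what is proved, stated in full; the proofs are below) =====
def Claim_equal_solve : Prop := ∀ (N : Int) (D : Int) (A : List Int) (B : List Int), Dom_solve N D A B → Spec_solve N D A B (solve N D A B)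

-- ===== LEMMAS AND PROOFS =====


-- flatten a run-length queue into A's queue of individual timestamps
def blocksFlat (q : List (Int × Int)) : List Int :=
  q.flatMap (fun p => List.replicate p.2.toNat p.1)

def AllPos (q : List (Int × Int)) : Prop := ∀ p ∈ q, 0 < p.2

lemma foldl_append_replicate (x : Int) :
    ∀ (l : List Int) (f : List Int),
      l.foldl (fun f _ => f ++ [x]) f = f ++ List.replicate l.length x := by
  intro l
  induction l with
  | nil => intro f; simp
  | cons y ys ih =>
      intro f
      simp [List.foldl, ih, List.replicate_succ]

lemma dropB_replicate_lt {e i : Int} (h : e < i) :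
    ∀ (n : Nat) (b : Int), 0 < b →
      ∀ rest, solveDropB b i (List.replicate n e ++ rest) = solveDropB b i rest := by
  intro n
  induction n with
  | zero => intro b _ rest; simp
  | succ m ih =>
      intro b hb rest
      have hge : ¬ (e ≥ i) := not_le.mpr h
      simp [List.replicate_succ, solveDropB, hb, hge]
      exact ih b hb rest

lemma dropB_replicate_ge_big {e i : Int} (h : e ≥ i) :
    ∀ (n : Nat) (b : Int), (n : Int) ≤ b →
      ∀ rest, solveDropB b i (List.replicate n e ++ rest) = solveDropB (b - n) i rest := by
  intro n
  induction n with
  | zero => intro b _ rest; simp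
  | succ m ih =>
      intro b hnb rest
      have hb : 0 < b := by push_cast at hnb; omega
      simp only [List.replicate_succ, List.cons_append, solveDropB, if_pos hb, if_pos h]
      rw [ih (b - 1) (by push_cast at hnb ⊢; omega) rest]
      congr 1
      push_cast
      ring

lemma dropB_replicate_ge_small {e i : Int} (h : e ≥ i) :
    ∀ (n : Nat) (b : Int), 0 ≤ b → b < (n : Int) →
      ∀ rest, solveDropB b i (List.replicate n e ++ rest)
        = List.replicate (n - b.toNat) e ++ rest := by
  intro n
  induction n with
  | zero => intro b h0 h1 rest; omega
  | succ m ih =>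
      intro b h0 h1 rest
      by_cases hb : 0 < b
      · simp only [List.replicate_succ, List.cons_append, solveDropB, if_pos hb, if_pos h]
        rw [ih (b - 1) (by omega) (by push_cast at h1 ⊢; omega) rest]
        congr 2
        omega
      · have hb0 : b = 0 := by omega
        simp only [List.replicate_succ, List.cons_append, solveDropB, hb0]
        simp [List.replicate_succ]

lemma blocksFlat_cons (e c : Int) (rest : List (Int × Int)) :
    blocksFlat ((e, c) :: rest) = List.replicate c.toNat e ++ blocksFlat rest := by
  simp [blocksFlat]

lemma dropB_flat :
    ∀ (q : List (Int × Int)) (b i : Int), AllPos q →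
      solveDropB b i (blocksFlat q) = blocksFlat (altDropB b i q)
        ∧ AllPos (altDropB b i q) := by
  intro q
  induction q with
  | nil => intro b i h; exact ⟨rfl, h⟩
  | cons p rest ih =>
      intro b i hpos
      obtain ⟨e, c⟩ := p
      have hc : 0 < c := hpos (e, c) (by simp)
      have hrest : AllPos rest := fun x hx => hpos x (List.mem_cons_of_mem _ hx)
      by_cases hb : 0 < b
      · by_cases hei : e < i
        · have := ih b i hrest
          rw [blocksFlat_cons, dropB_replicate_lt hei c.toNat b hb]
          simpa [altDropB, hb, hei] using this
        · have hge : e ≥ i := not_lt.mp hei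
          by_cases hbc : b < c
          · -- take = b < c : block shrinks, loop ends
            have hbne : ¬ (b = c) := by omega
            rw [blocksFlat_cons,
              dropB_replicate_ge_small hge c.toNat b (le_of_lt hb) (by omega)]
            constructor
            · simp only [altDropB, if_pos hb, if_neg hei, if_pos hbc, if_neg hbne,
                blocksFlat_cons]
              congr 2
              omega
            · intro x hx
              simp only [altDropB, if_pos hb, if_neg hei, if_pos hbc, if_neg hbne] at hx
              rcases List.mem_cons.mp hx with h1 | h2
              · subst h1; simp; omega
              · exact hrest x h2
          · -- take = c ≤ b : whole block consumed
            have hcb : (c.toNat : Int) ≤ b := by omega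
            have := ih (b - c.toNat) i hrest
            rw [blocksFlat_cons, dropB_replicate_ge_big hge c.toNat b hcb]
            have hcc : ((c.toNat : Int)) = c := by omega
            rw [hcc] at this ⊢
            simpa [altDropB, hb, hei, hbc] using this
      · rw [blocksFlat_cons]
        have hcn : ∃ m, c.toNat = m + 1 := ⟨c.toNat - 1, by omega⟩
        obtain ⟨m, hm⟩ := hcn
        rw [hm]
        constructor
        · simp only [List.replicate_succ, List.cons_append, solveDropB, if_neg hb,
            altDropB, blocksFlat_cons, hm, List.replicate_succ, List.cons_append]
        · simpa [altDropB, hb] using hpos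

lemma dropExp_replicate_le {e i : Int} (h : e ≤ i) :
    ∀ (n : Nat) (rest : List Int),
      solveDropExp i (List.replicate n e ++ rest) = solveDropExp i rest := by
  intro n
  induction n with
  | zero => intro rest; simp
  | succ m ih =>
      intro rest
      simp only [List.replicate_succ, List.cons_append, solveDropExp, if_pos h]
      exact ih rest

lemma dropExp_flat :
    ∀ (q : List (Int × Int)) (i : Int), AllPos q →
      solveDropExp i (blocksFlat q) = blocksFlat (altDropExp i q)
        ∧ AllPos (altDropExp i q) := by
  intro q
  induction q with
  | nil => intro i h; exact ⟨rfl, h⟩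
  | cons p rest ih =>
      intro i hpos
      obtain ⟨e, c⟩ := p
      have hc : 0 < c := hpos (e, c) (by simp)
      have hrest : AllPos rest := fun x hx => hpos x (List.mem_cons_of_mem _ hx)
      by_cases hei : e ≤ i
      · have := ih i hrest
        rw [blocksFlat_cons, dropExp_replicate_le hei c.toNat]
        simpa [altDropExp, hei] using this
      · rw [blocksFlat_cons]
        obtain ⟨m, hm⟩ : ∃ m, c.toNat = m + 1 := ⟨c.toNat - 1, by omega⟩
        rw [hm]
        constructor
        · simp only [List.replicate_succ, List.cons_append, solveDropExp, if_neg hei,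
            altDropExp, blocksFlat_cons, hm, List.replicate_succ]
        · simpa [altDropExp, hei] using hpos

lemma blocksFlat_append_block (q : List (Int × Int)) (i D a : Int) :
    blocksFlat (if a > 0 then q ++ [(i + D, a)] else q)
      = blocksFlat q ++ List.replicate a.toNat (i + D) := by
  by_cases ha : a > 0
  · simp [ha, blocksFlat]
  · have : a.toNat = 0 := by omega
    simp [ha, this]

lemma allPos_append_block (q : List (Int × Int)) (i D a : Int) (h : AllPos q) :
    AllPos (if a > 0 then q ++ [(i + D, a)] else q) := by
  by_cases ha : a > 0
  · intro x hx
    simp only [if_pos ha, List.mem_append, List.mem_singleton] at hx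
    rcases hx with h1 | h2
    · exact h x h1
    · subst h2; simpa using ha
  · simpa [ha] using h

lemma fold_flat (D : Int) :
    ∀ (L : List (Int × (Int × Int))) (q : List (Int × Int)), AllPos q →
      L.foldl (fun fifo p =>
          let i := p.1; let a := p.2.1; let b := p.2.2
          let f1 := (PySem.List.pyRange 0 a 1).foldl (fun f _ => f ++ [i + D]) fifo
          solveDropExp i (solveDropB b i f1)) (blocksFlat q)
        = blocksFlat (L.foldl (fun q p =>
            let i := p.1; let a := p.2.1; let b := p.2.2
            let q1 := if a > 0 then q ++ [(i + D, a)] else q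
            altDropExp i (altDropB b i q1)) q)
      ∧ AllPos (L.foldl (fun q p =>
            let i := p.1; let a := p.2.1; let b := p.2.2
            let q1 := if a > 0 then q ++ [(i + D, a)] else q
            altDropExp i (altDropB b i q1)) q) := by
  intro L
  induction L with
  | nil => intro q hq; exact ⟨rfl, hq⟩
  | cons p rest ih =>
      intro q hq
      obtain ⟨i, a, b⟩ := p
      simp only [List.foldl_cons]
      have hlen : (PySem.List.pyRange 0 a 1).length = a.toNat := by
        simp [PySem.List.length_pyRange_one]
      have happ :
          (PySem.List.pyRange 0 a 1).foldl (fun f _ => f ++ [i + D]) (blocksFlat q)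
            = blocksFlat (if a > 0 then q ++ [(i + D, a)] else q) := by
        rw [foldl_append_replicate (i + D) (PySem.List.pyRange 0 a 1) (blocksFlat q),
          hlen, blocksFlat_append_block]
      have hq1 : AllPos (if a > 0 then q ++ [(i + D, a)] else q) :=
        allPos_append_block q i D a hq
      obtain ⟨hB, hBpos⟩ := dropB_flat (if a > 0 then q ++ [(i + D, a)] else q) b i hq1
      obtain ⟨hE, hEpos⟩ :=
        dropExp_flat (altDropB b i (if a > 0 then q ++ [(i + D, a)] else q)) i hBpos
      have hstep :
          solveDropExp i (solveDropB b i
              ((PySem.List.pyRange 0 a 1).foldl (fun f _ => f ++ [i + D]) (blocksFlat q)))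
            = blocksFlat (altDropExp i (altDropB b i
                (if a > 0 then q ++ [(i + D, a)] else q))) := by
        rw [happ, hB, hE]
      simp only [hstep]
      exact ih _ hEpos

lemma length_flat (q : List (Int × Int)) (h : AllPos q) :
    ((blocksFlat q).length : Int) = (q.map Prod.snd).sum := by
  induction q with
  | nil => simp [blocksFlat]
  | cons p rest ih =>
      obtain ⟨e, c⟩ := p
      have hc : 0 < c := h (e, c) (by simp)
      have hrest : AllPos rest := fun x hx => h x (List.mem_cons_of_mem _ hx)
      rw [blocksFlat_cons]
      simp only [List.length_append, List.length_replicate, List.map_cons, List.sum_cons]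
      rw [← ih hrest]
      push_cast
      omega

-- ===== VERDICT =====
theorem solve_spec : Claim_equal_solve := by
  intro N D A B _
  unfold Spec_solve solve solve_alt
  have h0 : AllPos ([] : List (Int × Int)) := by intro x hx; simp at hx
  obtain ⟨heq, hpos⟩ := fold_flat D (PySem.List.enumerate (A.zip B) 1) [] h0
  have hflat : blocksFlat ([] : List (Int × Int)) = [] := rfl
  rw [hflat] at heq
  simp only [heq]
  exact length_flat _ hpos
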